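-- pv_equiv track=rewrite | github.com/wsteijn/MITx-Inrtroduction-to-Computer-Science-and-Programming-Using-Python | Chapter 4/Problem Set 4/P3_Word_Validity.py | isValidWord
-- ===== SOURCE A (Python) =====
-- def isValidWord(word, hand, wordList):
--     """
--     Returns True if word is in the wordList and is entirely
--     composed of letters in the hand. Otherwise, returns False.
--
--     Does not mutate hand or wordList.
--
--     word: string
--     hand: dictionary (string -> int)
--     wordList: list of lowercase strings
--     """
--     wordDict = {}
--     if word not in wordList:
--         return False
--     elif word in wordList:
--         for letter in word:
--             wordDict[letter] = wordDict.get(letter,0) + 1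
--         for x in wordDict.keys():
--             if x not in hand or wordDict[x] > hand[x]:
--                 return False
--         else:
--             return True
-- ===== SOURCE B (Python) =====
-- def isValidWord(word, hand, wordList):
--     if word not in wordList:
--         return False
--     avail = dict(hand)
--     for letter in word:
--         n = avail.get(letter, 0)
--         if n <= 0:
--             return False
--         avail[letter] = n - 1
--     return True
-- ===== Notes on version B (the rewrite author's own statement) =====
-- stated objective: simpler
-- what changed: Instead of tallying the whole word into a frequency dict and then comparing it key-by-key against hand, B makes one copy of hand and consumes it in a single pass over the word, failing as soon as a letter is unavailable.
import Mathlib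
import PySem

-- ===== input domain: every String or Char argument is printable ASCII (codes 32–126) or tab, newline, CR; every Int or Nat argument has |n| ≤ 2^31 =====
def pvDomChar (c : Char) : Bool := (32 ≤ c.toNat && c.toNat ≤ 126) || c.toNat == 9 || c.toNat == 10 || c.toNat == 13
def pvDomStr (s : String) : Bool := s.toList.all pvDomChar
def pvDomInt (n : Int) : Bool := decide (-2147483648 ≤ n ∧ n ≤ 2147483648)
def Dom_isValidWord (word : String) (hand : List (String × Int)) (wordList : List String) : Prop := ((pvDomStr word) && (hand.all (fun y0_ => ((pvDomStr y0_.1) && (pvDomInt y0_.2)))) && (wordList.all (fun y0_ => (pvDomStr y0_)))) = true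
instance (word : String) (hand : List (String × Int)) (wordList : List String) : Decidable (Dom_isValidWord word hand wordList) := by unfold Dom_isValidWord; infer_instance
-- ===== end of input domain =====

-- B replaces A's build-a-frequency-dict-then-compare with a single consuming pass
-- over a copy of hand (objective: simpler).


-- a Python character of `word` as the one-character string used as a dict key
def sOf (c : Char) : String := String.ofList [c]

-- ===== PORT A =====
-- `for x in wordDict.keys(): if x not in hand or wordDict[x] > hand[x]: return False` / for-else `return True`
def checkKeysA (wd hd : PySem.Dict String Int) : List String → Bool
  | [] => true
  | x :: xs =>
    match hd.get? x with
    | none => false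
    | some hv => if wd.getD x 0 > hv then false else checkKeysA wd hd xs

def isValidWord (word : String) (hand : List (String × Int)) (wordList : List String) : Bool :=
  if ¬ wordList.contains word then false
  else  -- `elif word in wordList:` — always true here
    let wordDict : PySem.Dict String Int :=
      word.toList.foldl (fun d c => d.insert (sOf c) (d.getD (sOf c) 0 + 1)) PySem.Dict.empty
    checkKeysA wordDict (PySem.Dict.mk hand) wordDict.keys

-- ===== PORT B =====
-- `for letter in word: n = avail.get(letter, 0); if n <= 0: return False; avail[letter] = n - 1` / `return True`
def consumeB : List Char → PySem.Dict String Int → Bool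
  | [], _ => true
  | c :: cs, avail =>
    if avail.getD (sOf c) 0 ≤ 0 then false
    else consumeB cs (avail.insert (sOf c) (avail.getD (sOf c) 0 - 1))

def isValidWord_alt (word : String) (hand : List (String × Int)) (wordList : List String) : Bool :=
  if ¬ wordList.contains word then false
  else consumeB word.toList (PySem.Dict.mk hand)

-- ===== PRECONDITION & SPEC =====
def Spec_isValidWord (word : String) (hand : List (String × Int)) (wordList : List String) (out : Bool) : Prop := out = isValidWord_alt word hand wordList
instance (word : String) (hand : List (String × Int)) (wordList : List String) (out : Bool) : Decidable (Spec_isValidWord word hand wordList out) := by unfold Spec_isValidWord; infer_instance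

-- ===== CLAIM (what is proved, stated in full; the proofs are below) =====
def Claim_equal_isValidWord : Prop := ∀ (word : String) (hand : List (String × Int)) (wordList : List String), Dom_isValidWord word hand wordList → Spec_isValidWord word hand wordList (isValidWord word hand wordList)

-- ===== LEMMAS AND PROOFS =====

theorem sOf_injective : Function.Injective sOf := by
  intro a b h
  simpa using String.ofList_inj.mp h

theorem checkKeysA_eq_all (wd hd : PySem.Dict String Int) (l : List String) :
    checkKeysA wd hd l =
      l.all (fun x => match hd.get? x with
        | none => false
        | some hv => decide (wd.getD x 0 ≤ hv)) := by
  induction l with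
  | nil => rfl
  | cons x xs ih =>
    rw [List.all_cons, ← ih]
    cases h : hd.get? x with
    | none => simp [checkKeysA, h]
    | some hv =>
      by_cases hlt : wd.getD x 0 > hv
      · simp [checkKeysA, h, hlt, show ¬ wd.getD x 0 ≤ hv by omega]
      · simp [checkKeysA, h, hlt, show wd.getD x 0 ≤ hv by omega]

theorem consumeB_iff (l : List Char) (avail : PySem.Dict String Int) :
    consumeB l avail = true ↔
      ∀ c ∈ l, (l.count c : Int) ≤ avail.getD (sOf c) 0 := by
  induction l generalizing avail with
  | nil => simp [consumeB]
  | cons c cs ih =>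
    simp only [consumeB]
    by_cases hn : avail.getD (sOf c) 0 ≤ 0
    · rw [if_pos hn]
      constructor
      · intro h; exact Bool.noConfusion h
      · intro h
        exfalso
        have hc := h c (by simp)
        have hpos : 0 < (c :: cs).count c := List.count_pos_iff.mpr (by simp)
        have : (1 : Int) ≤ ((c :: cs).count c : Int) := by exact_mod_cast hpos
        omega
    · rw [if_neg hn, ih]
      constructor
      · intro h c' hc'
        by_cases hcc : c' = c
        · subst hcc
          by_cases hmemcs : c' ∈ cs
          · have h2 := h c' hmemcs
            rw [PySem.Dict.getD_insert, if_pos rfl] at h2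
            have he : (c' :: cs).count c' = cs.count c' + 1 := by simp
            rw [he]; push_cast; omega
          · have he : (c' :: cs).count c' = 1 := by
              simp [List.count_eq_zero_of_not_mem hmemcs]
            rw [he]; push_cast; omega
        · have hmem : c' ∈ cs := by
            rcases List.mem_cons.mp hc' with h' | h'
            · exact absurd h' hcc
            · exact h'
          have h2 := h c' hmem
          have hne : sOf c' ≠ sOf c := fun h' => hcc (sOf_injective h')
          rw [PySem.Dict.getD_insert, if_neg hne] at h2
          have he : (c :: cs).count c' = cs.count c' := by simp [Ne.symm hcc]
          rw [he]; exact h2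
      · intro h c' hc'
        by_cases hcc : c' = c
        · subst hcc
          rw [PySem.Dict.getD_insert, if_pos rfl]
          have h2 := h c' (by simp)
          have he : (c' :: cs).count c' = cs.count c' + 1 := by simp
          rw [he] at h2; push_cast at h2; omega
        · have hne : sOf c' ≠ sOf c := fun h' => hcc (sOf_injective h')
          rw [PySem.Dict.getD_insert, if_neg hne]
          have h2 := h c' (List.mem_cons_of_mem _ hc')
          have he : (c :: cs).count c' = cs.count c' := by simp [Ne.symm hcc]
          rw [he] at h2; exact h2

theorem isValidWord_true_iff (word : String) (hand : List (String × Int)) (wordList : List String) :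
    isValidWord word hand wordList = true ↔
      wordList.contains word = true ∧
        ∀ c ∈ word.toList, ∃ v, (PySem.Dict.mk hand).get? (sOf c) = some v ∧
          (word.toList.count c : Int) ≤ v := by
  unfold isValidWord
  by_cases hin : wordList.contains word
  · simp only [hin, not_true_eq_false, if_neg, not_false_eq_true, true_and]
    have hfold : word.toList.foldl (fun d c => d.insert (sOf c) (d.getD (sOf c) 0 + 1))
        PySem.Dict.empty = PySem.Dict.counter (word.toList.map sOf) := by
      rw [← PySem.Dict.foldl_insert_getD_add_one_eq_counter, List.foldl_map]
    rw [hfold, checkKeysA_eq_all]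
    rw [PySem.Dict.keys_counter]
    simp only [List.all_eq_true]
    constructor
    · intro h c hc
      have hx : sOf c ∈ PySem.Set.ofList (word.toList.map sOf) := by
        rw [PySem.Set.mem_ofList]
        exact List.mem_map_of_mem hc
      have := h _ hx
      cases hg : (PySem.Dict.mk hand).get? (sOf c) with
      | none => rw [hg] at this; cases this
      | some hv =>
        rw [hg] at this
        refine ⟨hv, rfl, ?_⟩
        have hcnt : (PySem.Dict.counter (word.toList.map sOf)).getD (sOf c) 0
            = ((word.toList.map sOf).count (sOf c) : Int) := PySem.Dict.getD_counter _ _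
        rw [hcnt, List.count_map_of_injective _ _ sOf_injective] at this
        exact of_decide_eq_true this
    · intro h x hx
      rw [PySem.Set.mem_ofList] at hx
      rcases List.mem_map.mp hx with ⟨c, hc, rfl⟩
      rcases h c hc with ⟨v, hg, hle⟩
      rw [hg]
      have hcnt : (PySem.Dict.counter (word.toList.map sOf)).getD (sOf c) 0
          = ((word.toList.map sOf).count (sOf c) : Int) := PySem.Dict.getD_counter _ _
      rw [hcnt, List.count_map_of_injective _ _ sOf_injective]
      exact decide_eq_true hle
  · have hnot : word ∉ wordList := by simpa using hin
    simp
    intro hmem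
    exact absurd hmem hnot

theorem isValidWord_alt_true_iff (word : String) (hand : List (String × Int)) (wordList : List String) :
    isValidWord_alt word hand wordList = true ↔
      wordList.contains word = true ∧
        ∀ c ∈ word.toList, (word.toList.count c : Int) ≤ (PySem.Dict.mk hand).getD (sOf c) 0 := by
  unfold isValidWord_alt
  by_cases hin : wordList.contains word
  · simp [consumeB_iff]
  · have hnot : word ∉ wordList := by simpa using hin
    simp
    intro hmem
    exact absurd hmem hnot

theorem conditions_agree (word : String) (hand : List (String × Int)) (c : Char)
    (hc : c ∈ word.toList) :
    ((∃ v, (PySem.Dict.mk hand).get? (sOf c) = some v ∧ (word.toList.count c : Int) ≤ v) ↔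
      (word.toList.count c : Int) ≤ (PySem.Dict.mk hand).getD (sOf c) 0) := by
  have hpos : (0 : Int) < (word.toList.count c : Int) := by
    have : 0 < word.toList.count c := List.count_pos_iff.mpr hc
    exact_mod_cast this
  cases hg : (PySem.Dict.mk hand).get? (sOf c) with
  | none =>
    rw [PySem.Dict.getD_eq_get?_getD, hg]
    simp only [Option.getD_none]
    constructor
    · rintro ⟨v, hv, _⟩; cases hv
    · intro h; omega
  | some v =>
    rw [PySem.Dict.getD_eq_get?_getD, hg]
    simp only [Option.getD_some]
    constructor
    · rintro ⟨w, hw, hle⟩; cases hw; exact hle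
    · intro h; exact ⟨v, rfl, h⟩

-- ===== VERDICT (by name: the statement is the Claim_ definition above) =====
theorem isValidWord_spec : Claim_equal_isValidWord := by
  intro word hand wordList _
  unfold Spec_isValidWord
  rw [Bool.eq_iff_iff, isValidWord_true_iff, isValidWord_alt_true_iff]
  constructor
  · rintro ⟨h1, h2⟩
    exact ⟨h1, fun c hc => (conditions_agree word hand c hc).mp (h2 c hc)⟩
  · rintro ⟨h1, h2⟩
    exact ⟨h1, fun c hc => (conditions_agree word hand c hc).mpr (h2 c hc)⟩
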